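-- pv_equiv track=rewrite | github.com/MegaGiciorPortas/WDI-Zadania | 02-tablice_jednowymiarowe/2.76.py | func
-- ===== SOURCE A (Python) =====
-- def func(T):
--     N = len(T)
--
--     # 1. POPRAWKA PĘTLI:
--     # Iterujemy po 'L' (długość), od N (cała tablica) do 1.
--     for L in range(N, 0, -1):
--
--         # Iterujemy 'i' (start pierwszego fragmentu)
--         for i in range(N - L + 1):
--
--             fragment1 = T[i: i + L]
--             fragment1_rewers = fragment1[::-1]  # Robimy rewers (w C++ pętlą)
--
--             # Iterujemy 'j' (start drugiego fragmentu)
--             for j in range(N - L + 1):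
--
--                 # 2. POPRAWKA "SAMODOPASOWANIA":
--                 # Pomiń, jeśli sprawdzamy ten sam fragment
--                 if i == j:
--                     continue
--
--                 fragment2 = T[j: j + L]
--
--                 if fragment1_rewers == fragment2:
--                     # Znaleźliśmy! Ponieważ idziemy od L=N w dół,
--                     # to jest to najdłuższy możliwy.
--                     return L
--
--     # 3. POPRAWKA ZWROTU:
--     # Jeśli pętle się skończyły, nic nie znaleziono
--     return 0
-- ===== SOURCE B (Python) =====
-- def _walk(T, n, a, b, best):
--     # walk one diagonal: cells (a+t, b+t); run = current cross-match streak
--     run = 0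
--     while a < n and b < n:
--         if T[a] == T[n - 1 - b]:
--             run += 1
--             c = run - 1 if a + b + 2 - n == run else run
--             if c > best:
--                 best = c
--         else:
--             run = 0
--         a += 1
--         b += 1
--     return best
--
--
-- def func(T):
--     # longest L with rev(T[i:i+L]) == T[j:j+L], i != j, via an O(n^2)
--     # longest-common-substring scan of T against its reverse: each diagonal
--     # keeps a single running match counter; a cell (a,b) with streak m yields
--     # a valid pair of length m unless that length forces i == j (then m-1).
--     n = len(T)
--     best = 0
--     for a0 in range(n):
--         best = _walk(T, n, a0, 0, best)
--     for b0 in range(1, n):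
--         best = _walk(T, n, 0, b0, best)
--     return best
-- ===== Notes on version B (the rewrite author's own statement) =====
-- stated objective: faster
-- what changed: A tries every length L descending and every pair of start positions with slice comparison (O(n^4)); B computes the longest common-substring-with-reverse via a single O(n^2) diagonal scan of T against reversed T, keeping one running match counter per diagonal and discounting the unique length on each cell that would force the two start indices to coincide.
import Mathlib
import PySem

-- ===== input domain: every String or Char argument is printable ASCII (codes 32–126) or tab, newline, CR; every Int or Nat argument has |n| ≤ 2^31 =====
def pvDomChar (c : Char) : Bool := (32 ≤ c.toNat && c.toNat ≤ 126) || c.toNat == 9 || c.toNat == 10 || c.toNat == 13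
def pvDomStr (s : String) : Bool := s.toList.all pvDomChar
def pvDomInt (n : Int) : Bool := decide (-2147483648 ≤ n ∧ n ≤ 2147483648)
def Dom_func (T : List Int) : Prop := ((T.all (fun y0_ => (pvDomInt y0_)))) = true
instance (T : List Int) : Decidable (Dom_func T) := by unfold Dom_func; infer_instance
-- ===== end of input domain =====

-- B replaces A's O(n^4) all-pairs slice search by an O(n^2) diagonal scan of T against its
-- reverse with one running match counter per diagonal (objective: faster, asymptotic).


-- ===== PORT A =====
-- inner 'for j' loop: skip j == i, compare fragment1_rewers with T[j:j+L]
def funcJ (T : List Int) (L i : Int) (rev1 : List Int) : List Int → Bool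
  | [] => false
  | j :: js =>
    if i = j then funcJ T L i rev1 js
    else if rev1 = PySem.List.slice T (some j) (some (j + L)) then true
    else funcJ T L i rev1 js

-- middle 'for i' loop: fragment1 = T[i:i+L]; fragment1[::-1] is List.reverse
-- (PySem.List.slice?_none_none_neg_one)
def funcI (T : List Int) (L : Int) : List Int → Bool
  | [] => false
  | i :: is =>
    let frag1 := PySem.List.slice T (some i) (some (i + L))
    let rev1 := frag1.reverse
    if funcJ T L i rev1 (PySem.List.pyRange 0 ((T.length : Int) - L + 1) 1) then true
    else funcI T L is

-- outer 'for L in range(N, 0, -1)' loop with the early 'return L'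
def funcL (T : List Int) : List Int → Int
  | [] => 0
  | L :: Ls =>
    if funcI T L (PySem.List.pyRange 0 ((T.length : Int) - L + 1) 1) then L
    else funcL T Ls

def func (T : List Int) : Int :=
  funcL T (PySem.List.pyRange (T.length : Int) 0 (-1))

-- ===== PORT B =====
-- Source B's _walk while-loop; both indices are always in range, so T[a] / T[n-1-b]
-- are ported with pyGetD (default never used)
def funcWalkLoop (T : List Int) (n a b run best : Int) : Int :=
  if h : a < n ∧ b < n then
    if PySem.List.pyGetD T a 0 = PySem.List.pyGetD T (n - 1 - b) 0 then
      let run' := run + 1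
      let c := if a + b + 2 - n = run' then run' - 1 else run'
      funcWalkLoop T n (a + 1) (b + 1) run' (if c > best then c else best)
    else funcWalkLoop T n (a + 1) (b + 1) 0 best
  else best
termination_by (n - a).toNat
decreasing_by all_goals omega

-- Source B's _walk (run initialised to 0)
def funcWalk (T : List Int) (n a b best : Int) : Int := funcWalkLoop T n a b 0 best

def func_alt (T : List Int) : Int :=
  let n : Int := (T.length : Int)
  let best1 := (PySem.List.pyRange 0 n 1).foldl (fun best a0 => funcWalk T n a0 0 best) 0
  (PySem.List.pyRange 1 n 1).foldl (fun best b0 => funcWalk T n 0 b0 best) best1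

-- ===== PRECONDITION & SPEC =====
def Spec_func (T : List Int) (out : Int) : Prop := out = func_alt T
instance (T : List Int) (out : Int) : Decidable (Spec_func T out) := by unfold Spec_func; infer_instance

-- ===== CLAIM (what is proved, stated in full; the proofs are below) =====
def Claim_equal_func : Prop := ∀ (T : List Int), Dom_func T → Spec_func T (func T)

-- ===== LEMMAS AND PROOFS =====

-- T[k] as an Int-indexed total read (indices are always in range where used)
def gT (T : List Int) (k : Int) : Int := PySem.List.pyGetD T k 0

-- cross match at cell (a, b): T[a] == T[n-1-b]
def matB (T : List Int) (a b : Nat) : Bool :=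
  decide (gT T (a : Int) = gT T ((T.length : Int) - 1 - (b : Int)))

-- length of the current cross-match streak ending at cell (a, b) on its diagonal
def streak (T : List Int) : Nat → Nat → Nat
  | 0, b => if matB T 0 b then 1 else 0
  | a + 1, 0 => if matB T (a + 1) 0 then 1 else 0
  | a + 1, b + 1 => if matB T (a + 1) (b + 1) then streak T a b + 1 else 0

-- the best length obtainable from cell (a, b): the streak, minus one exactly when
-- that length would force the two fragments to start at the same index
def contrib (T : List Int) (a b : Nat) : Int :=
  if streak T a b = 0 then 0
  else if (a : Int) + (b : Int) + 2 - (T.length : Int) = (streak T a b : Int)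
    then (streak T a b : Int) - 1
  else (streak T a b : Int)

-- the specification both programs compute the greatest witness of
def PGood (T : List Int) (L : Int) : Prop :=
  1 ≤ L ∧ ∃ i j : Int, 0 ≤ i ∧ i + L ≤ (T.length : Int) ∧ 0 ≤ j ∧ j + L ≤ (T.length : Int) ∧
    i ≠ j ∧ ∀ t : Int, 0 ≤ t → t < L → gT T (i + L - 1 - t) = gT T (j + t)

-- what A's two inner loops search for at a fixed L
def QA (T : List Int) (L : Int) : Prop :=
  ∃ i ∈ PySem.List.pyRange 0 ((T.length : Int) - L + 1) 1,
  ∃ j ∈ PySem.List.pyRange 0 ((T.length : Int) - L + 1) 1,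
    j ≠ i ∧ (PySem.List.slice T (some i) (some (i + L))).reverse
              = PySem.List.slice T (some j) (some (j + L))

-- run value carried into cell (a, b) by the walk: the streak of the previous cell
def runOf (T : List Int) : Nat → Nat → Int
  | a + 1, b + 1 => (streak T a b : Int)
  | _, _ => 0

lemma streak_le (T : List Int) : ∀ a b, streak T a b ≤ a + 1 ∧ streak T a b ≤ b + 1 := by
  intro a b
  fun_induction streak T a b <;> simp_all

lemma streak_match (T : List Int) : ∀ a b t, t < streak T a b → matB T (a - t) (b - t) = true := by
  intro a b
  fun_induction streak T a b with
  | case1 b h => intro t ht; have : t = 0 := by omega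
                 subst this; simpa using h
  | case2 b h => intro t ht; omega
  | case3 a h => intro t ht; have : t = 0 := by omega
                 subst this; simpa using h
  | case4 a h => intro t ht; omega
  | case5 a b h ih =>
      intro t ht
      match t with
      | 0 => simpa using h
      | t + 1 => simpa using ih t (by omega)
  | case6 a b h => intro t ht; omega

lemma streak_ge (T : List Int) : ∀ (L a b : Nat), (∀ t, t < L → matB T (a - t) (b - t) = true) →
    L ≤ a + 1 → L ≤ b + 1 → L ≤ streak T a b := by
  intro L a b
  induction a generalizing b L with
  | zero =>
      intro h ha hb
      match L with
      | 0 => omega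
      | 1 => have := h 0 (by omega); simp at this; simp [streak, this]
      | L + 2 => omega
  | succ a ih =>
      intro h ha hb
      match L with
      | 0 => omega
      | L + 1 =>
        have h0 := h 0 (by omega)
        simp at h0
        match b with
        | 0 => have : L = 0 := by omega
               subst this; simp [streak, h0]
        | b + 1 =>
            have hrec : L ≤ streak T a b := by
              apply ih L b (fun t ht => ?_) (by omega) (by omega)
              have := h (t + 1) (by omega)
              simpa using this
            simp [streak, h0]; omega

lemma runOf_nonneg (T : List Int) (a b : Nat) : 0 ≤ runOf T a b := by
  match a, b with
  | 0, b => simp [runOf]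
  | a + 1, 0 => simp [runOf]
  | a + 1, b + 1 => simp [runOf]

lemma runOf_succ (T : List Int) (a b : Nat) (h : matB T a b = true) :
    runOf T a b + 1 = (streak T a b : Int) := by
  match a, b with
  | 0, b => simp [runOf, streak, h]
  | a + 1, 0 => simp [runOf, streak, h]
  | a + 1, b + 1 => simp [runOf, streak, h]

lemma streak_zero_of_not_mat (T : List Int) (a b : Nat) (h : ¬ matB T a b = true) :
    streak T a b = 0 := by
  match a, b with
  | 0, b => simp [streak, h]
  | a + 1, 0 => simp [streak, h]
  | a + 1, b + 1 => simp [streak, h]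

lemma runOf_shift (T : List Int) (a b : Nat) : runOf T (a + 1) (b + 1) = (streak T a b : Int) := rfl

lemma contrib_nonneg (T : List Int) (a b : Nat) : 0 ≤ contrib T a b := by
  unfold contrib
  split_ifs <;> omega

lemma contrib_of_streak_ne (T : List Int) (a b : Nat) (h : streak T a b ≠ 0) :
    contrib T a b = if (a : Int) + (b : Int) + 2 - (T.length : Int) = (streak T a b : Int)
      then (streak T a b : Int) - 1 else (streak T a b : Int) := by
  unfold contrib
  rw [if_neg h]

lemma elem_take (T : List Int) (i L : Int) (hi : 0 ≤ i) (hiL : i + L ≤ (T.length : Int))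
    (k : Nat) (hk : k < L.toNat) :
    ((T.drop i.toNat).take L.toNat)[k]'(by simp; omega) = gT T (i + k) := by
  rw [List.getElem_take, List.getElem_drop]
  unfold gT
  rw [PySem.List.pyGetD_eq_getElem _ _ (by omega) (by omega)]
  congr 1
  omega

lemma elem_take_rev (T : List Int) (i L : Int) (hi : 0 ≤ i) (hiL : i + L ≤ (T.length : Int))
    (k : Nat) (hk : k < L.toNat) :
    ((T.drop i.toNat).take L.toNat).reverse[k]'(by simp; omega) = gT T (i + L - 1 - k) := by
  rw [List.getElem_reverse, List.getElem_take, List.getElem_drop]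
  unfold gT
  rw [PySem.List.pyGetD_eq_getElem _ _ (by omega) (by omega)]
  congr 1
  simp
  omega

lemma slice_rev_eq_iff (T : List Int) (i j L : Int) (hi : 0 ≤ i) (hiL : i + L ≤ (T.length : Int))
    (hj : 0 ≤ j) (hjL : j + L ≤ (T.length : Int)) (hL : 1 ≤ L) :
    ((PySem.List.slice T (some i) (some (i + L))).reverse
      = PySem.List.slice T (some j) (some (j + L)))
    ↔ ∀ t : Int, 0 ≤ t → t < L → gT T (i + L - 1 - t) = gT T (j + t) := by
  rw [PySem.List.slice_toNat T hi (by omega), PySem.List.slice_toNat T hj (by omega)]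
  have e1 : (i + L).toNat - i.toNat = L.toNat := by omega
  have e2 : (j + L).toNat - j.toNat = L.toNat := by omega
  rw [e1, e2]
  constructor
  · intro heq t ht htL
    have hk : t.toNat < L.toNat := by omega
    have h3 : gT T (i + L - 1 - (t.toNat : Int)) = gT T (j + (t.toNat : Int)) := by
      rw [← elem_take_rev T i L hi hiL t.toNat hk, ← elem_take T j L hj hjL t.toNat hk]
      exact List.getElem_of_eq heq _
    rw [Int.toNat_of_nonneg ht] at h3
    exact h3
  · intro h
    apply List.ext_getElem
    · simp; omega
    · intro k hk1 hk2
      have hk : k < L.toNat := by simp at hk2; omega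
      rw [elem_take_rev T i L hi hiL k hk, elem_take T j L hj hjL k hk]
      exact h k (by omega) (by omega)

lemma cell_to_P (T : List Int) (a b : Nat) (ha : a < T.length) (hb : b < T.length)
    (hc : 1 ≤ contrib T a b) : PGood T (contrib T a b) := by
  have hs0 : streak T a b ≠ 0 := by
    intro h0
    rw [contrib, if_pos h0] at hc
    omega
  have hsle := streak_le T a b
  rw [contrib_of_streak_ne T a b hs0] at hc ⊢
  set m : Int := (streak T a b : Int) with hm
  set c : Int := if (a : Int) + (b : Int) + 2 - (T.length : Int) = m then m - 1 else m with hcdef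
  have hcm : c ≤ m := by rw [hcdef]; split_ifs <;> omega
  have hcf : c ≠ (a : Int) + (b : Int) + 2 - (T.length : Int) := by
    rw [hcdef]; split_ifs with h <;> omega
  refine ⟨hc, (a : Int) - c + 1, (T.length : Int) - 1 - (b : Int), by omega, by omega, by omega,
    by omega, by omega, ?_⟩
  intro t ht htc
  have htm : t.toNat < streak T a b := by omega
  have hmat := streak_match T a b t.toNat htm
  simp only [matB, decide_eq_true_eq] at hmat
  have ea : ((a - t.toNat : Nat) : Int) = (a : Int) - t := by omega
  have eb : ((b - t.toNat : Nat) : Int) = (b : Int) - t := by omega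
  rw [ea, eb] at hmat
  have e3 : (a : Int) - c + 1 + c - 1 - t = (a : Int) - t := by ring
  have e4 : (T.length : Int) - 1 - ((b : Int) - t) = (T.length : Int) - 1 - (b : Int) + t := by ring
  rw [e3]
  rw [e4] at hmat
  exact hmat

lemma P_to_cell (T : List Int) (L : Int) (hP : PGood T L) :
    ∃ a b : Nat, a < T.length ∧ b < T.length ∧ L ≤ contrib T a b := by
  obtain ⟨hL1, i, j, hi, hiL, hj, hjL, hne, hpt⟩ := hP
  refine ⟨(i + L - 1).toNat, ((T.length : Int) - 1 - j).toNat, by omega, by omega, ?_⟩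
  set a : Nat := (i + L - 1).toNat with hadef
  set b : Nat := ((T.length : Int) - 1 - j).toNat with hbdef
  have hai : (a : Int) = i + L - 1 := by omega
  have hbj : (b : Int) = (T.length : Int) - 1 - j := by omega
  have hstreak : L.toNat ≤ streak T a b := by
    apply streak_ge T L.toNat a b (fun t ht => ?_) (by omega) (by omega)
    simp only [matB, decide_eq_true_eq]
    have ea : ((a - t : Nat) : Int) = i + L - 1 - t := by omega
    have eb : (T.length : Int) - 1 - ((b - t : Nat) : Int) = j + t := by omega
    rw [ea, eb]
    exact hpt t (by omega) (by omega)
  have hLf : L ≠ (a : Int) + (b : Int) + 2 - (T.length : Int) := by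
    intro h
    apply hne
    omega
  rw [contrib_of_streak_ne T a b (by omega)]
  split_ifs with h <;> omega

-- one-step unfoldings of the walk loop (zeta-reduced forms of its equation lemma)
lemma walk_step_match (T : List Int) (n a b run best : Int)
    (hab : a < n ∧ b < n) (hm : PySem.List.pyGetD T a 0 = PySem.List.pyGetD T (n - 1 - b) 0) :
    funcWalkLoop T n a b run best = funcWalkLoop T n (a + 1) (b + 1) (run + 1)
      (if (if a + b + 2 - n = run + 1 then run + 1 - 1 else run + 1) > best
        then (if a + b + 2 - n = run + 1 then run + 1 - 1 else run + 1) else best) := by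
  rw [funcWalkLoop, dif_pos hab, if_pos hm]

lemma walk_step_miss (T : List Int) (n a b run best : Int)
    (hab : a < n ∧ b < n) (hm : ¬ PySem.List.pyGetD T a 0 = PySem.List.pyGetD T (n - 1 - b) 0) :
    funcWalkLoop T n a b run best = funcWalkLoop T n (a + 1) (b + 1) 0 best := by
  rw [funcWalkLoop, dif_pos hab, if_neg hm]

lemma walk_step_exit (T : List Int) (n a b run best : Int) (hab : ¬ (a < n ∧ b < n)) :
    funcWalkLoop T n a b run best = best := by
  rw [funcWalkLoop, dif_neg hab]

-- ===== the walk invariant =====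
lemma walk_spec (T : List Int) : ∀ (a b : Nat) (best : Int), 0 ≤ best →
    (funcWalkLoop T (T.length : Int) a b (runOf T a b) best = best ∨
      ∃ t : Nat, a + t < T.length ∧ b + t < T.length ∧
        funcWalkLoop T (T.length : Int) a b (runOf T a b) best = contrib T (a + t) (b + t)) ∧
    best ≤ funcWalkLoop T (T.length : Int) a b (runOf T a b) best ∧
    (∀ t : Nat, a + t < T.length → b + t < T.length →
      contrib T (a + t) (b + t) ≤ funcWalkLoop T (T.length : Int) a b (runOf T a b) best) := by
  have main : ∀ (d a b : Nat) (best : Int), T.length - a ≤ d → 0 ≤ best →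
      (funcWalkLoop T (T.length : Int) a b (runOf T a b) best = best ∨
        ∃ t : Nat, a + t < T.length ∧ b + t < T.length ∧
          funcWalkLoop T (T.length : Int) a b (runOf T a b) best = contrib T (a + t) (b + t)) ∧
      best ≤ funcWalkLoop T (T.length : Int) a b (runOf T a b) best ∧
      (∀ t : Nat, a + t < T.length → b + t < T.length →
        contrib T (a + t) (b + t) ≤ funcWalkLoop T (T.length : Int) a b (runOf T a b) best) := by
    intro d
    induction d with
    | zero =>
        intro a b best hd hbest
        rw [walk_step_exit T _ _ _ _ _ (by omega)]
        exact ⟨Or.inl rfl, le_refl _, fun t ht1 ht2 => by omega⟩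
    | succ d ih =>
        intro a b best hd hbest
        by_cases hab : ((a : Int) < (T.length : Int) ∧ (b : Int) < (T.length : Int))
        · by_cases hm : PySem.List.pyGetD T (a : Int) 0
              = PySem.List.pyGetD T ((T.length : Int) - 1 - (b : Int)) 0
          · rw [walk_step_match T _ _ _ _ _ hab hm]
            have hmat : matB T a b = true := by
              simp only [matB, gT, decide_eq_true_eq]
              exact hm
            have hrun : runOf T a b + 1 = (streak T a b : Int) := runOf_succ T a b hmat
            have hs0 : streak T a b ≠ 0 := by
              have := runOf_nonneg T a b
              omega
            have hceq : (if (a : Int) + (b : Int) + 2 - (T.length : Int) = runOf T a b + 1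
                then runOf T a b + 1 - 1 else runOf T a b + 1) = contrib T a b := by
              rw [contrib_of_streak_ne T a b hs0, ← hrun]
            set c : Int := if (a : Int) + (b : Int) + 2 - (T.length : Int) = runOf T a b + 1
                then runOf T a b + 1 - 1 else runOf T a b + 1 with hc
            set best' : Int := if c > best then c else best with hb'
            have hbb' : best ≤ best' := by rw [hb']; split_ifs <;> omega
            have hcb' : contrib T a b ≤ best' := by
              rw [hb', ← hceq]; split_ifs <;> omega
            have hb'0 : 0 ≤ best' := le_trans hbest hbb'
            have hcast : ((a + 1 : Nat) : Int) = (a : Int) + 1 := by push_cast; ring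
            have hcast2 : ((b + 1 : Nat) : Int) = (b : Int) + 1 := by push_cast; ring
            have hrec := ih (a + 1) (b + 1) best' (by omega) hb'0
            rw [runOf_shift, hcast, hcast2, ← hrun] at hrec
            refine ⟨?_, le_trans hbb' hrec.2.1, ?_⟩
            · rcases hrec.1 with h | ⟨t, ht1, ht2, ht3⟩
              · rw [h, hb']
                split_ifs with hgt
                · right
                  exact ⟨0, by omega, by omega, by simp only [Nat.add_zero]; rw [← hceq]⟩
                · left; rfl
              · right
                exact ⟨t + 1, by omega, by omega, by rw [ht3]; congr 1 <;> omega⟩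
            · intro t ht1 ht2
              match t with
              | 0 => exact le_trans hcb' hrec.2.1
              | t + 1 =>
                  have := hrec.2.2 t (by omega) (by omega)
                  calc contrib T (a + (t + 1)) (b + (t + 1))
                      = contrib T (a + 1 + t) (b + 1 + t) := by congr 1 <;> omega
                    _ ≤ _ := this
          · rw [walk_step_miss T _ _ _ _ _ hab hm]
            have hmat : ¬ matB T a b = true := by
              simp only [matB, gT, decide_eq_true_eq]
              exact hm
            have hs0 : streak T a b = 0 := streak_zero_of_not_mat T a b hmat
            have hcontrib0 : contrib T a b = 0 := by rw [contrib, if_pos hs0]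
            have hcast : ((a + 1 : Nat) : Int) = (a : Int) + 1 := by push_cast; ring
            have hcast2 : ((b + 1 : Nat) : Int) = (b : Int) + 1 := by push_cast; ring
            have hrz : runOf T (a + 1) (b + 1) = 0 := by rw [runOf_shift, hs0]; rfl
            have hrec := ih (a + 1) (b + 1) best (by omega) hbest
            rw [hrz, hcast, hcast2] at hrec
            refine ⟨?_, hrec.2.1, ?_⟩
            · rcases hrec.1 with h | ⟨t, ht1, ht2, ht3⟩
              · left; exact h
              · right
                exact ⟨t + 1, by omega, by omega, by rw [ht3]; congr 1 <;> omega⟩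
            · intro t ht1 ht2
              match t with
              | 0 => simpa [hcontrib0] using hrec.2.1.trans' hbest
              | t + 1 =>
                  have := hrec.2.2 t (by omega) (by omega)
                  calc contrib T (a + (t + 1)) (b + (t + 1))
                      = contrib T (a + 1 + t) (b + 1 + t) := by congr 1 <;> omega
                    _ ≤ _ := this
        · rw [walk_step_exit T _ _ _ _ _ hab]
          exact ⟨Or.inl rfl, le_refl _, fun t ht1 ht2 => by omega⟩
  intro a b best hbest
  exact main T.length a b best (by omega) hbest

-- ===== the two fold loops of func_alt =====
lemma fold1_spec (T : List Int) : ∀ (l : List Int), (∀ x ∈ l, 0 ≤ x) → ∀ init : Int, 0 ≤ init →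
    (0 ≤ l.foldl (fun best a0 => funcWalk T (T.length : Int) a0 0 best) init ∧
      init ≤ l.foldl (fun best a0 => funcWalk T (T.length : Int) a0 0 best) init) ∧
    (∀ x ∈ l, ∀ t : Nat, x.toNat + t < T.length → t < T.length →
      contrib T (x.toNat + t) t ≤ l.foldl (fun best a0 => funcWalk T (T.length : Int) a0 0 best) init) ∧
    (l.foldl (fun best a0 => funcWalk T (T.length : Int) a0 0 best) init = init ∨
      ∃ a b : Nat, a < T.length ∧ b < T.length ∧
        l.foldl (fun best a0 => funcWalk T (T.length : Int) a0 0 best) init = contrib T a b) := by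
  intro l
  induction l with
  | nil => intro _ init h0; exact ⟨⟨h0, le_refl _⟩, by simp, Or.inl rfl⟩
  | cons x l ih =>
      intro hpos init h0
      have hx : 0 ≤ x := hpos x List.mem_cons_self
      have hw := walk_spec T x.toNat 0 init h0
      have hxcast : ((x.toNat : Nat) : Int) = x := by omega
      have hr0 : runOf T x.toNat 0 = 0 := by
        match hx0 : x.toNat with
        | 0 => rfl
        | n + 1 => rfl
      rw [hr0, hxcast] at hw
      have hwdef : funcWalk T (T.length : Int) x 0 init
          = funcWalkLoop T (T.length : Int) x 0 0 init := rfl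
      set w := funcWalkLoop T (T.length : Int) x 0 0 init with hwset
      have hw0 : 0 ≤ w := le_trans h0 hw.2.1
      have hrec := ih (fun y hy => hpos y (List.mem_cons_of_mem x hy)) w hw0
      simp only [List.foldl_cons, hwdef]
      refine ⟨⟨hrec.1.1, le_trans hw.2.1 hrec.1.2⟩, ?_, ?_⟩
      · intro y hy t ht1 ht2
        rcases List.mem_cons.mp hy with rfl | hyl
        · exact le_trans (by simpa using hw.2.2 t (by omega) (by omega)) hrec.1.2
        · exact hrec.2.1 y hyl t ht1 ht2
      · rcases hrec.2.2 with h | h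
        · rw [h]
          rcases hw.1 with h2 | ⟨t, ht1, ht2, ht3⟩
          · exact Or.inl h2
          · exact Or.inr ⟨x.toNat + t, t, by omega, by omega, by simpa using ht3⟩
        · exact Or.inr h

lemma fold2_spec (T : List Int) : ∀ (l : List Int), (∀ x ∈ l, 0 ≤ x) → ∀ init : Int, 0 ≤ init →
    (0 ≤ l.foldl (fun best b0 => funcWalk T (T.length : Int) 0 b0 best) init ∧
      init ≤ l.foldl (fun best b0 => funcWalk T (T.length : Int) 0 b0 best) init) ∧
    (∀ x ∈ l, ∀ t : Nat, t < T.length → x.toNat + t < T.length →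
      contrib T t (x.toNat + t) ≤ l.foldl (fun best b0 => funcWalk T (T.length : Int) 0 b0 best) init) ∧
    (l.foldl (fun best b0 => funcWalk T (T.length : Int) 0 b0 best) init = init ∨
      ∃ a b : Nat, a < T.length ∧ b < T.length ∧
        l.foldl (fun best b0 => funcWalk T (T.length : Int) 0 b0 best) init = contrib T a b) := by
  intro l
  induction l with
  | nil => intro _ init h0; exact ⟨⟨h0, le_refl _⟩, by simp, Or.inl rfl⟩
  | cons x l ih =>
      intro hpos init h0
      have hx : 0 ≤ x := hpos x List.mem_cons_self
      have hw := walk_spec T 0 x.toNat init h0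
      have hxcast : ((x.toNat : Nat) : Int) = x := by omega
      have hr0 : runOf T 0 x.toNat = 0 := rfl
      rw [hr0, hxcast] at hw
      have hwdef : funcWalk T (T.length : Int) 0 x init
          = funcWalkLoop T (T.length : Int) 0 x 0 init := rfl
      set w := funcWalkLoop T (T.length : Int) 0 x 0 init with hwset
      have hw0 : 0 ≤ w := le_trans h0 hw.2.1
      have hrec := ih (fun y hy => hpos y (List.mem_cons_of_mem x hy)) w hw0
      simp only [List.foldl_cons, hwdef]
      refine ⟨⟨hrec.1.1, le_trans hw.2.1 hrec.1.2⟩, ?_, ?_⟩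
      · intro y hy t ht1 ht2
        rcases List.mem_cons.mp hy with rfl | hyl
        · exact le_trans (by simpa using hw.2.2 t (by omega) (by omega)) hrec.1.2
        · exact hrec.2.1 y hyl t ht1 ht2
      · rcases hrec.2.2 with h | h
        · rw [h]
          rcases hw.1 with h2 | ⟨t, ht1, ht2, ht3⟩
          · exact Or.inl h2
          · exact Or.inr ⟨t, x.toNat + t, by omega, by omega, by simpa using ht3⟩
        · exact Or.inr h

lemma func_alt_eq (T : List Int) : func_alt T =
    (PySem.List.pyRange 1 (T.length : Int) 1).foldl
      (fun best b0 => funcWalk T (T.length : Int) 0 b0 best)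
      ((PySem.List.pyRange 0 (T.length : Int) 1).foldl
        (fun best a0 => funcWalk T (T.length : Int) a0 0 best) 0) := rfl

lemma func_alt_attained (T : List Int) :
    func_alt T = 0 ∨ ∃ a b : Nat, a < T.length ∧ b < T.length ∧ func_alt T = contrib T a b := by
  rw [func_alt_eq]
  have h1 := fold1_spec T (PySem.List.pyRange 0 (T.length : Int) 1)
    (fun x hx => (PySem.List.mem_pyRange_one.mp hx).1) 0 (le_refl 0)
  set best1 := (PySem.List.pyRange 0 (T.length : Int) 1).foldl
    (fun best a0 => funcWalk T (T.length : Int) a0 0 best) 0 with hb1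
  have h2 := fold2_spec T (PySem.List.pyRange 1 (T.length : Int) 1)
    (fun x hx => by have := (PySem.List.mem_pyRange_one.mp hx).1; omega) best1 h1.1.1
  rcases h2.2.2 with h | h
  · rw [h]
    exact h1.2.2
  · exact Or.inr h

lemma func_alt_max (T : List Int) (a b : Nat) (ha : a < T.length) (hb : b < T.length) :
    contrib T a b ≤ func_alt T := by
  rw [func_alt_eq]
  have h1 := fold1_spec T (PySem.List.pyRange 0 (T.length : Int) 1)
    (fun x hx => (PySem.List.mem_pyRange_one.mp hx).1) 0 (le_refl 0)
  set best1 := (PySem.List.pyRange 0 (T.length : Int) 1).foldl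
    (fun best a0 => funcWalk T (T.length : Int) a0 0 best) 0 with hb1
  have h2 := fold2_spec T (PySem.List.pyRange 1 (T.length : Int) 1)
    (fun x hx => by have := (PySem.List.mem_pyRange_one.mp hx).1; omega) best1 h1.1.1
  by_cases hab : b ≤ a
  · have hx : ((a - b : Nat) : Int) ∈ PySem.List.pyRange 0 (T.length : Int) 1 := by
      rw [PySem.List.mem_pyRange_one]
      omega
    have := h1.2.1 ((a - b : Nat) : Int) hx b (by omega) (by omega)
    have hcast : ((a - b : Nat) : Int).toNat = a - b := by omega
    rw [hcast] at this
    have hcell : a - b + b = a := by omega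
    rw [hcell] at this
    exact le_trans this h2.1.2
  · have hx : ((b - a : Nat) : Int) ∈ PySem.List.pyRange 1 (T.length : Int) 1 := by
      rw [PySem.List.mem_pyRange_one]
      omega
    have := h2.2.1 ((b - a : Nat) : Int) hx a (by omega) (by omega)
    have hcast : ((b - a : Nat) : Int).toNat = b - a := by omega
    rw [hcast] at this
    have hcell : b - a + a = b := by omega
    rw [hcell] at this
    exact this

lemma B_val (T : List Int) : func_alt T = 0 ∨ PGood T (func_alt T) := by
  rcases func_alt_attained T with h | ⟨a, b, ha, hb, h⟩
  · exact Or.inl h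
  · by_cases hc : 1 ≤ contrib T a b
    · exact Or.inr (h ▸ cell_to_P T a b ha hb hc)
    · have := contrib_nonneg T a b
      left
      omega

lemma B_max (T : List Int) (L : Int) (hL : PGood T L) : L ≤ func_alt T := by
  obtain ⟨a, b, ha, hb, h⟩ := P_to_cell T L hL
  exact le_trans h (func_alt_max T a b ha hb)

-- ===== A: characterisation of func =====
lemma funcJ_true_iff (T : List Int) (L i : Int) (rev1 : List Int) (js : List Int) :
    funcJ T L i rev1 js = true ↔
      ∃ j ∈ js, j ≠ i ∧ rev1 = PySem.List.slice T (some j) (some (j + L)) := by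
  induction js with
  | nil => simp [funcJ]
  | cons j js ih =>
      simp only [funcJ, List.mem_cons]
      split_ifs with hij hr
      · subst hij
        rw [ih]
        constructor
        · rintro ⟨j', h1, h2, h3⟩
          exact ⟨j', Or.inr h1, h2, h3⟩
        · rintro ⟨j', (rfl | h1), h2, h3⟩
          · exact absurd rfl h2
          · exact ⟨j', h1, h2, h3⟩
      · constructor
        · intro _
          exact ⟨j, Or.inl rfl, Ne.symm hij, hr⟩
        · intro _
          rfl
      · rw [ih]
        constructor
        · rintro ⟨j', h1, h2, h3⟩
          exact ⟨j', Or.inr h1, h2, h3⟩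
        · rintro ⟨j', (rfl | h1), h2, h3⟩
          · exact absurd h3 hr
          · exact ⟨j', h1, h2, h3⟩

lemma funcI_true_iff (T : List Int) (L : Int) (is : List Int) :
    funcI T L is = true ↔
      ∃ i ∈ is, ∃ j ∈ PySem.List.pyRange 0 ((T.length : Int) - L + 1) 1,
        j ≠ i ∧ (PySem.List.slice T (some i) (some (i + L))).reverse
                  = PySem.List.slice T (some j) (some (j + L)) := by
  induction is with
  | nil => simp [funcI]
  | cons i is ih =>
      simp only [funcI, List.mem_cons]
      split_ifs with hJ
      · rw [funcJ_true_iff] at hJ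
        constructor
        · intro _
          obtain ⟨j, hj1, hj2, hj3⟩ := hJ
          exact ⟨i, Or.inl rfl, j, hj1, hj2, hj3⟩
        · intro _
          rfl
      · rw [ih]
        rw [funcJ_true_iff] at hJ
        constructor
        · rintro ⟨i', h1, h⟩
          exact ⟨i', Or.inr h1, h⟩
        · rintro ⟨i', (rfl | h1), h⟩
          · exact absurd h hJ
          · exact ⟨i', h1, h⟩

lemma funcL_spec (T : List Int) : ∀ (m : Nat), (m : Int) ≤ (T.length : Int) →
    (funcL T (PySem.List.pyRange (m : Int) 0 (-1)) = 0 ∨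
      (1 ≤ funcL T (PySem.List.pyRange (m : Int) 0 (-1)) ∧
        funcL T (PySem.List.pyRange (m : Int) 0 (-1)) ≤ (m : Int) ∧
        QA T (funcL T (PySem.List.pyRange (m : Int) 0 (-1))))) ∧
    (∀ L : Int, funcL T (PySem.List.pyRange (m : Int) 0 (-1)) < L → L ≤ (m : Int) → ¬ QA T L) := by
  intro m
  induction m with
  | zero =>
      intro _
      rw [PySem.List.pyRange_neg_one_eq_nil (by omega)]
      simp only [funcL]
      exact ⟨Or.inl (by trivial), fun L h1 h2 _ => by omega⟩
  | succ m ih =>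
      intro hm
      have hstep := ih (by push_cast at hm ⊢; omega)
      rw [PySem.List.pyRange_neg_one_cons (by positivity)]
      have e1 : ((m : Int) + 1 - 1) = (m : Int) := by ring
      push_cast
      rw [e1]
      simp only [funcL]
      split_ifs with hI
      · rw [funcI_true_iff] at hI
        exact ⟨Or.inr ⟨by omega, le_refl _, hI⟩, fun L h1 h2 => by omega⟩
      · rw [funcI_true_iff] at hI
        refine ⟨?_, fun L h1 h2 => ?_⟩
        · rcases hstep.1 with h | ⟨ha1, ha2, ha3⟩
          · exact Or.inl h
          · exact Or.inr ⟨ha1, by omega, ha3⟩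
        · by_cases hL : L ≤ (m : Int)
          · exact hstep.2 L h1 hL
          · have : L = (m : Int) + 1 := by omega
            subst this
            exact fun hQ => hI hQ

lemma P_iff_QA (T : List Int) (L : Int) :
    PGood T L ↔ (1 ≤ L ∧ L ≤ (T.length : Int) ∧ QA T L) := by
  constructor
  · rintro ⟨hL1, i, j, hi, hiL, hj, hjL, hne, hpt⟩
    refine ⟨hL1, by omega, i, ?_, j, ?_, Ne.symm hne, ?_⟩
    · rw [PySem.List.mem_pyRange_one]; omega
    · rw [PySem.List.mem_pyRange_one]; omega
    · exact (slice_rev_eq_iff T i j L hi hiL hj hjL hL1).mpr hpt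
  · rintro ⟨hL1, hLN, i, hi, j, hj, hne, heq⟩
    rw [PySem.List.mem_pyRange_one] at hi hj
    refine ⟨hL1, i, j, hi.1, by omega, hj.1, by omega, Ne.symm hne, ?_⟩
    exact (slice_rev_eq_iff T i j L hi.1 (by omega) hj.1 (by omega) hL1).mp heq

lemma A_val (T : List Int) : func T = 0 ∨ PGood T (func T) := by
  unfold func
  rcases (funcL_spec T T.length (le_refl _)).1 with h | ⟨h1, h2, h3⟩
  · exact Or.inl h
  · exact Or.inr ((P_iff_QA T _).mpr ⟨h1, h2, h3⟩)

lemma A_max (T : List Int) (L : Int) (hL : PGood T L) : L ≤ func T := by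
  obtain ⟨h1, h2, h3⟩ := (P_iff_QA T L).mp hL
  by_contra hlt
  unfold func at hlt
  exact (funcL_spec T T.length (le_refl _)).2 L (by omega) h2 h3

-- ===== VERDICT (by name: the statement is the Claim_ definition above) =====
theorem func_spec : Claim_equal_func := by
  intro T _
  unfold Spec_func
  rcases A_val T with hA | hA <;> rcases B_val T with hB | hB
  · rw [hA, hB]
  · have h1 := A_max T _ hB
    have h2 := hB.1
    omega
  · have h1 := B_max T _ hA
    have h2 := hA.1
    omega
  · exact le_antisymm (B_max T _ hA) (A_max T _ hB)
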